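-- pv_equiv track=rewrite | github.com/CrashDari/HOMRWORK_5 | 4-7.py | min_missing_number
-- ===== SOURCE A (Python) =====
-- def min_missing_number(arr):
--     n = len(arr)
--     min_val = min(arr)
--     max_val = max(arr)
--     count_arr = [0] * (max_val - min_val + 1)
--     for i in range(n):
--         count_arr[arr[i] - min_val] += 1
--     for i in range(max_val - min_val + 1):
--         if count_arr[i] == 0:
--             return min_val + i
--     return None
-- ===== SOURCE B (Python) =====
-- def min_missing_number(arr):
--     expected = min(arr)
--     for x in sorted(arr):
--         if x == expected:
--             expected += 1
--         elif x > expected: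
--             return expected
--     return None
-- ===== Notes on version B (the rewrite author's own statement) =====
-- stated objective: alternative
-- what changed: Replaced the value-range counting table (allocate max-min+1 counters, fill, then scan for the first zero) by a sort-and-sweep: sort the array once and walk it with an 'expected' cursor, returning at the first gap.
import Mathlib
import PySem

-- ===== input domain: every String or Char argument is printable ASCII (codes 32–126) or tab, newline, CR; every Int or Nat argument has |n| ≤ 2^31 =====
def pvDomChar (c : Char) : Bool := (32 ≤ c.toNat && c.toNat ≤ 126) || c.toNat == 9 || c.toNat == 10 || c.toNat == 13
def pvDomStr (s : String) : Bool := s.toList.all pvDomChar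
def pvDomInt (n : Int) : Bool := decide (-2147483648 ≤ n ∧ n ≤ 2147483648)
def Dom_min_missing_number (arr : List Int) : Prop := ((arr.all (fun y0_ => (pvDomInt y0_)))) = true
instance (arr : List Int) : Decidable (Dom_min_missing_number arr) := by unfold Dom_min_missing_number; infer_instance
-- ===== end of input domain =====

-- B replaces A's value-range counting table by sort-and-sweep with an 'expected' cursor: a different
-- algorithm of similar cost on dense inputs (equivalence proved on nonempty lists; min([]) raises ValueError).


-- ===== PORT A =====
-- A's second loop: 'for i in range(max-min+1): if count_arr[i] == 0: return min_val + i' (early return → recursion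
-- over the range list; count_arr[i] read with pyGetD, exact since every index the range yields is in range)
def pvScanA (minv : Int) (c : List Int) : List Int → Option Int
  | [] => none
  | i :: rest => if PySem.List.pyGetD c i 0 = 0 then some (minv + i) else pvScanA minv c rest

def min_missing_number (arr : List Int) : Option Int :=
  match PySem.List.min? arr (fun x => x), PySem.List.max? arr (fun x => x) with
  | some minv, some maxv =>
    -- count_arr = [0] * (max_val - min_val + 1)
    let countArr0 := PySem.List.pyRepeat [(0 : Int)] (maxv - minv + 1)
    -- for i in range(n): count_arr[arr[i] - min_val] += 1   (indices always in range, so pyGetD/pySetD are exact)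
    let countArr := (PySem.List.pyRange 0 (PySem.List.len arr)).foldl
      (fun c i =>
        PySem.List.pySetD c (PySem.List.pyGetD arr i 0 - minv)
          (PySem.List.pyGetD c (PySem.List.pyGetD arr i 0 - minv) 0 + 1)) countArr0
    pvScanA minv countArr (PySem.List.pyRange 0 (maxv - minv + 1))
  | _, _ => none  -- min(arr)/max(arr) on [] raise ValueError: excluded by Pre_

-- ===== PORT B =====
-- B's loop over sorted(arr) with the 'expected' cursor
def pvGoB (e : Int) : List Int → Option Int
  | [] => none
  | x :: xs => if x = e then pvGoB (e + 1) xs else if x > e then some e else pvGoB e xs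

def min_missing_number_alt (arr : List Int) : Option Int :=
  match PySem.List.min? arr (fun x => x) with
  | some e => pvGoB e (PySem.List.sorted arr (fun x => x))
  | none => none  -- min(arr) on [] raises ValueError: excluded by Pre_

-- ===== PRECONDITION & SPEC =====
-- Pre_ excludes only the empty list, on which Python's min(arr) raises ValueError (A returns nothing there).
def Pre_min_missing_number (arr : List Int) : Prop := arr ≠ []
instance (arr : List Int) : Decidable (Pre_min_missing_number arr) := by unfold Pre_min_missing_number; infer_instance
def pvWitness_min_missing_number : List Int := [3, 1, 1, 5]

def Spec_min_missing_number (arr : List Int) (out : Option Int) : Prop := out = min_missing_number_alt arr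
instance (arr : List Int) (out : Option Int) : Decidable (Spec_min_missing_number arr out) := by unfold Spec_min_missing_number; infer_instance

-- ===== CLAIM (what is proved, stated in full; the proofs are below) =====
def Claim_equal_min_missing_number : Prop := ∀ (arr : List Int), Dom_min_missing_number arr → Pre_min_missing_number arr → Spec_min_missing_number arr (min_missing_number arr)

-- ===== LEMMAS AND PROOFS =====

-- Reference: first integer ≥ e not in s, searched over n candidates; none if all n are present.
def pvFind (s : List Int) : Int → Nat → Option Int
  | _, 0 => none
  | e, n + 1 => if e ∈ s then pvFind s (e + 1) n else some e

theorem pvFind_cons_lt {x e : Int} {xs : List Int} (hx : x < e) :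
    ∀ n, pvFind (x :: xs) e n = pvFind xs e n := by
  intro n
  induction n generalizing e with
  | zero => rfl
  | succ n ih =>
    have hex : e ≠ x := by omega
    simp only [pvFind, List.mem_cons]
    by_cases hm : e ∈ xs
    · simp only [hm, or_true, if_true]
      exact ih (by omega)
    · simp [hex, hm]

theorem pvFind_congr {s t : List Int} (h : ∀ j, j ∈ s ↔ j ∈ t) :
    ∀ n e, pvFind s e n = pvFind t e n := by
  intro n
  induction n with
  | zero => intro e; rfl
  | succ n ih =>
    intro e
    simp only [pvFind, h e]
    by_cases hm : e ∈ t
    · simp [hm, ih]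
    · simp [hm]

-- B's sweep over a sorted list computes pvFind.
theorem pvGoB_eq_pvFind {maxv : Int} :
    ∀ (s : List Int) (e : Int), s.Pairwise (· ≤ ·) → (∀ x ∈ s, x ≤ maxv) →
      (maxv < e ∨ maxv ∈ s) →
      pvGoB e s = pvFind s e (maxv + 1 - e).toNat := by
  intro s
  induction s with
  | nil =>
    intro e _ _ h3
    have hlt : maxv < e := by simpa using h3
    have h0 : (maxv + 1 - e).toNat = 0 := by omega
    rw [h0]; rfl
  | cons x xs ih =>
    intro e hp hb h3
    obtain ⟨hpx, hp'⟩ := List.pairwise_cons.mp hp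
    have hxmax : x ≤ maxv := hb x (List.mem_cons_self ..)
    have hb' : ∀ y ∈ xs, y ≤ maxv := fun y hy => hb y (List.mem_cons_of_mem _ hy)
    rcases lt_trichotomy x e with hlt | heq | hgt
    · -- x < e: duplicate / below the cursor, skipped
      have h3' : maxv < e ∨ maxv ∈ xs := by
        rcases h3 with h | h
        · exact Or.inl h
        · rcases List.mem_cons.mp h with h1 | h2
          · exact Or.inl (by omega)
          · exact Or.inr h2
      have : pvGoB e (x :: xs) = pvGoB e xs := by
        have h1 : ¬ x = e := by omega
        have h2 : ¬ e < x := by omega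
        simp [pvGoB, h1, h2]
      rw [this, pvFind_cons_lt hlt, ih e hp' hb' h3']
    · -- x = e: consume, advance the cursor
      subst heq
      have hfuel : (maxv + 1 - x).toNat = (maxv + 1 - (x + 1)).toNat + 1 := by omega
      have h3' : maxv < x + 1 ∨ maxv ∈ xs := by
        rcases h3 with h | h
        · exact Or.inl (by omega)
        · rcases List.mem_cons.mp h with h1 | h2
          · exact Or.inl (by omega)
          · exact Or.inr h2
      have hstep : pvGoB x (x :: xs) = pvGoB (x + 1) xs := by simp [pvGoB]
      rw [hstep, hfuel]
      simp only [pvFind, List.mem_cons_self .., if_true]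
      rw [pvFind_cons_lt (by omega), ih (x + 1) hp' hb' h3']
    · -- e < x: first gap found
      have hnm : e ∉ x :: xs := by
        intro h
        rcases List.mem_cons.mp h with h1 | h2
        · omega
        · exact absurd (hpx e h2) (by omega)
      have hfuel : (maxv + 1 - e).toNat = (maxv - e).toNat + 1 := by omega
      rw [hfuel]
      have h1 : ¬ x = e := by omega
      simp [pvGoB, pvFind, h1, hgt, hnm]

-- A's counting loop: after the fold, slot i holds the multiplicity of minv + i.
theorem pvCount_fold {minv maxv : Int} {K : Nat} (hK : K = (maxv - minv + 1).toNat) :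
    ∀ (l : List Int) (c : List Int), (∀ x ∈ l, minv ≤ x ∧ x ≤ maxv) → c.length = K →
      (l.foldl (fun c x => PySem.List.pySetD c (x - minv)
          (PySem.List.pyGetD c (x - minv) 0 + 1)) c).length = K ∧
      ∀ i : Nat, i < K →
        (l.foldl (fun c x => PySem.List.pySetD c (x - minv)
            (PySem.List.pyGetD c (x - minv) 0 + 1)) c).getD i 0
          = c.getD i 0 + l.count (minv + i) := by
  intro l
  induction l with
  | nil =>
    intro c _ hc
    exact ⟨hc, fun i _ => by simp⟩
  | cons x l ih =>
    intro c hx hc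
    have hxb := hx x (List.mem_cons_self ..)
    have hKpos : (0 : Int) ≤ maxv - minv := by omega
    have hidx0 : (0 : Int) ≤ x - minv := by omega
    have hidxK : (x - minv).toNat < K := by omega
    have hstep : PySem.List.pySetD c (x - minv) (PySem.List.pyGetD c (x - minv) 0 + 1)
        = c.set (x - minv).toNat (c.getD (x - minv).toNat 0 + 1) := by
      rw [PySem.List.pySetD_of_nonneg _ _ hidx0,
        PySem.List.pyGetD_eq_getElem _ _ hidx0 (by rw [hc]; omega),
        List.getD_eq_getElem _ _ (by omega)]
    have hlen' : (c.set (x - minv).toNat (c.getD (x - minv).toNat 0 + 1)).length = K := by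
      simpa using hc
    have hx' : ∀ y ∈ l, minv ≤ y ∧ y ≤ maxv := fun y hy => hx y (List.mem_cons_of_mem _ hy)
    obtain ⟨ihlen, ihget⟩ := ih _ hx' hlen'
    simp only [List.foldl_cons, hstep]
    refine ⟨ihlen, fun i hi => ?_⟩
    rw [ihget i hi]
    have hset : (c.set (x - minv).toNat (c.getD (x - minv).toNat 0 + 1)).getD i 0
        = if (x - minv).toNat = i then c.getD (x - minv).toNat 0 + 1 else c.getD i 0 := by
      rw [List.getD_eq_getElem _ _ (by omega), List.getElem_set]
      split_ifs with h
      · rfl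
      · exact (List.getD_eq_getElem _ _ (by omega)).symm
    rw [hset]
    by_cases hxi : x = minv + i
    · simp only [List.count_cons, hxi]
      push_cast
      simp
      ring
    · have hne : (x - minv).toNat ≠ i := by omega
      simp only [hne, if_false, List.count_cons]
      simp [hxi]

-- A's zero scan computes pvFind.
theorem pvScanA_eq_pvFind {arr c : List Int} {minv k : Int}
    (hlen : c.length = k.toNat)
    (hc : ∀ i : Nat, i < k.toNat → c.getD i 0 = (arr.count (minv + i) : Int)) :
    ∀ (n : Nat) (j : Int), 0 ≤ j → (k - j).toNat = n →
      pvScanA minv c (PySem.List.pyRange j k) = pvFind arr (minv + j) n := by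
  intro n
  induction n with
  | zero =>
    intro j hj hn
    rw [PySem.List.pyRange_one_eq_nil (by omega)]
    rfl
  | succ n ih =>
    intro j hj hn
    have hjk : j < k := by omega
    rw [PySem.List.pyRange_one_cons hjk]
    have hcast : ((j.toNat : Int)) = j := by omega
    have hg : PySem.List.pyGetD c j 0 = (arr.count (minv + j) : Int) := by
      rw [PySem.List.pyGetD_eq_getElem _ _ hj (by rw [hlen]; omega)]
      have h1 := hc j.toNat (by omega)
      rw [List.getD_eq_getElem _ _ (by omega), hcast] at h1
      exact h1
    simp only [pvScanA, hg]
    by_cases hm : (minv + j) ∈ arr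
    · have hcnt : arr.count (minv + j) ≠ 0 := by
        simpa using (List.count_pos_iff.mpr hm).ne'
      have hcnt' : ¬ ((arr.count (minv + j) : Int) = 0) := by exact_mod_cast hcnt
      rw [if_neg hcnt']
      have := ih (j + 1) (by omega) (by omega)
      rw [this]
      simp only [pvFind, hm, if_true]
      ring_nf
    · have hcnt : arr.count (minv + j) = 0 := List.count_eq_zero.mpr hm
      rw [if_pos (by exact_mod_cast hcnt)]
      simp [pvFind, hm]

-- ===== VERDICT (by name: the statement is the Claim_ definition above) =====
theorem min_missing_number_spec : Claim_equal_min_missing_number := by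
  intro arr _ hpre
  unfold Spec_min_missing_number
  obtain ⟨minv, hmin⟩ : ∃ m, PySem.List.min? arr (fun x => x) = some m := by
    cases h : PySem.List.min? arr (fun x => x) with
    | none => exact absurd ((PySem.List.min?_eq_none_iff _ _).mp h) hpre
    | some m => exact ⟨m, rfl⟩
  obtain ⟨maxv, hmax⟩ : ∃ m, PySem.List.max? arr (fun x => x) = some m := by
    cases h : PySem.List.max? arr (fun x => x) with
    | none => exact absurd ((PySem.List.max?_eq_none_iff _ _).mp h) hpre
    | some m => exact ⟨m, rfl⟩
  have hminmem : minv ∈ arr := PySem.List.min?_mem hmin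
  have hmaxmem : maxv ∈ arr := PySem.List.max?_mem hmax
  have hminle : ∀ y ∈ arr, minv ≤ y := PySem.List.min?_isMin hmin
  have hmaxge : ∀ y ∈ arr, y ≤ maxv := PySem.List.max?_isMax hmax
  have hmm : minv ≤ maxv := hminle maxv hmaxmem
  have hKeq : maxv + 1 - minv = maxv - minv + 1 := by ring
  -- A's side: counting table + zero scan = pvFind
  have hA : min_missing_number arr = pvFind arr minv (maxv - minv + 1).toNat := by
    unfold min_missing_number
    rw [hmin, hmax]
    simp only [PySem.List.pyRepeat_singleton]
    rw [PySem.List.foldl_pyRange_zero_pyGetD arr 0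
      (fun c x => PySem.List.pySetD c (x - minv) (PySem.List.pyGetD c (x - minv) 0 + 1))
      (List.replicate (maxv - minv + 1).toNat 0)]
    have hfold := pvCount_fold (minv := minv) (maxv := maxv) rfl arr
      (List.replicate (maxv - minv + 1).toNat 0)
      (fun x hx => ⟨hminle x hx, hmaxge x hx⟩) (by simp)
    have hc : ∀ i : Nat, i < (maxv - minv + 1).toNat →
        (arr.foldl (fun c x => PySem.List.pySetD c (x - minv)
          (PySem.List.pyGetD c (x - minv) 0 + 1))
          (List.replicate (maxv - minv + 1).toNat 0)).getD i 0
        = (arr.count (minv + i) : Int) := by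
      intro i hi
      rw [hfold.2 i hi]
      simp
    have := pvScanA_eq_pvFind (k := maxv - minv + 1) hfold.1 hc (maxv - minv + 1).toNat 0
      le_rfl (by omega)
    simpa using this
  -- B's side: sweep of the sorted list = pvFind
  have hB : min_missing_number_alt arr = pvFind arr minv (maxv - minv + 1).toNat := by
    unfold min_missing_number_alt
    rw [hmin]
    show pvGoB minv (PySem.List.sorted arr (fun x => x)) = _
    rw [pvGoB_eq_pvFind (maxv := maxv) (PySem.List.sorted arr (fun x => x)) minv
      (PySem.List.sorted_pairwise arr (fun x => x))
      (fun x hx => hmaxge x ((PySem.List.mem_sorted _ _ _ _).mp hx))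
      (Or.inr ((PySem.List.mem_sorted _ _ _ _).mpr hmaxmem))]
    rw [pvFind_congr (fun j => PySem.List.mem_sorted arr (fun x => x) false j), hKeq]
  rw [hA, hB]
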